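-- pv_equiv track=rewrite | github.com/gdetant76/AdventOfCode2024 | day4/part1.py | XMAShorizontal
-- ===== SOURCE A (Python) =====
-- def XMAShorizontal(reports):
--     sum = 0
--     for line in reports:
--         line = line.strip()
--
--         matches = line.count("XMAS")
--         matches += line.count("SAMX")
--
--         sum += matches
--
--     return sum
-- ===== SOURCE B (Python) =====
-- def XMAShorizontal(reports):
--     total = 0
--     for line in reports:
--         cs = line.strip()
--         while len(cs) >= 4:
--             if cs.startswith(("XMAS", "SAMX")):
--                 total += 1
--             cs = cs[1:]
--     return total
-- ===== Notes on version B (the rewrite author's own statement) =====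
-- stated objective: alternative
-- what changed: A's two separate str.count scans per line are fused into one sliding-window pass that tests both 4-char patterns at each position (valid because neither pattern self-overlaps and they cannot match at the same position).
import Mathlib
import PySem

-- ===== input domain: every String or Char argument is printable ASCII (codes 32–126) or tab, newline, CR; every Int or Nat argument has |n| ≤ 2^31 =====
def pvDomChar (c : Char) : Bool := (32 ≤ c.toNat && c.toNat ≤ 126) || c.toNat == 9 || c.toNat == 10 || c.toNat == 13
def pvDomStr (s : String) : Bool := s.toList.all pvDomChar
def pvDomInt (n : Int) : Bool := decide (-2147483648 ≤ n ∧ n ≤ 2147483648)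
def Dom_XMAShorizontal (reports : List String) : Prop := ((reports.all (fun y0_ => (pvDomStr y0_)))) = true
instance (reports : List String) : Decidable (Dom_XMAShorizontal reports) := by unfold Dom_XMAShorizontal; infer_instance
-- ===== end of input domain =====

-- B fuses A's two per-line str.count scans into one sliding-window pass testing both patterns; alternative decomposition, same cost.


-- ===== PORT A =====
def XMAShorizontal (reports : List String) : Int :=
  reports.foldl
    (fun sum line =>
      let line := PySem.Str.strip line
      let m : Int := (PySem.Str.count line "XMAS" : Int)
      let m := m + (PySem.Str.count line "SAMX" : Int)
      sum + m)
    0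

-- ===== PORT B =====
-- the while loop of Source B: 'cs = cs[1:]' is List.tail (exact: PySem.List.slice_from_one)
def scanXS (cs : List Char) (total : Int) : Int :=
  if 4 ≤ cs.length then
    scanXS cs.tail
      (if PySem.Chars.startswith cs "XMAS".toList || PySem.Chars.startswith cs "SAMX".toList
       then total + 1 else total)
  else total
termination_by cs.length
decreasing_by cases cs with
  | nil => simp at *
  | cons a t => simp

def XMAShorizontal_alt (reports : List String) : Int :=
  reports.foldl (fun total line => scanXS (PySem.Str.strip line).toList total) 0

-- ===== PRECONDITION & SPEC =====
def Spec_XMAShorizontal (reports : List String) (out : Int) : Prop := out = XMAShorizontal_alt reports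
instance (reports : List String) (out : Int) : Decidable (Spec_XMAShorizontal reports out) := by unfold Spec_XMAShorizontal; infer_instance

-- ===== CLAIM (what is proved, stated in full; the proofs are below) =====
def Claim_equal_XMAShorizontal : Prop := ∀ (reports : List String), Dom_XMAShorizontal reports → Spec_XMAShorizontal reports (XMAShorizontal reports)

-- ===== LEMMAS AND PROOFS =====

-- greedy non-overlapping count of a length-4 pattern, abstracted from PySem.Chars.count.go
def cnt4 (sub : List Char) : List Char → Nat
  | [] => 0
  | c :: t => if sub.isPrefixOf (c :: t) then 1 + cnt4 sub ((c :: t).drop 4) else cnt4 sub t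
termination_by l => l.length
decreasing_by all_goals (simp only [List.length_cons, List.length_drop]; omega)

theorem go4_eq (sub : List Char) (hs : sub.length = 4) :
    ∀ (fuel : Nat) (cs : List Char) (acc : Nat), cs.length ≤ fuel →
      PySem.Chars.count.go sub fuel cs acc = acc + cnt4 sub cs := by
  intro fuel
  induction fuel with
  | zero =>
    intro cs acc h
    have : cs = [] := by cases cs <;> simp_all
    subst this
    simp [PySem.Chars.count.go, cnt4]
  | succ n ih =>
    intro cs acc h
    cases cs with
    | nil => simp [PySem.Chars.count.go, cnt4]
    | cons c t =>
      rw [PySem.Chars.count.go]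
      by_cases hp : sub.isPrefixOf (c :: t)
      · rw [if_pos hp]
        rw [hs, ih _ _ (by simp at h ⊢; omega)]
        rw [cnt4, if_pos hp]
        omega
      · rw [if_neg hp]
        rw [ih _ _ (by simp at h ⊢; omega)]
        rw [cnt4, if_neg hp]

theorem count_eq_cnt4 (cs sub : List Char) (hs : sub.length = 4) :
    PySem.Chars.count cs sub = cnt4 sub cs := by
  have hne : sub.isEmpty = false := by cases sub <;> simp_all
  rw [PySem.Chars.count, hne]
  simpa using go4_eq sub hs cs.length cs 0 (le_refl _)

theorem cnt4_short (sub cs : List Char) (hs : sub.length = 4) (h : cs.length < 4) :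
    cnt4 sub cs = 0 := by
  induction cs with
  | nil => simp [cnt4]
  | cons c t ih =>
    rw [cnt4]
    have hp : sub.isPrefixOf (c :: t) = false := by
      by_contra hc
      have : sub <+: c :: t := List.isPrefixOf_iff_prefix.mp (by simpa using hc)
      have := this.length_le
      simp at h this
      omega
    rw [hp]
    · simp
      exact ih (by simp at h ⊢; omega)

theorem scanXS_eq (cs : List Char) (total : Int) :
    scanXS cs total = total + (cnt4 ['X', 'M', 'A', 'S'] cs : Int) + (cnt4 ['S', 'A', 'M', 'X'] cs : Int) := by
  induction cs, total using scanXS.induct with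
  | case2 cs total h =>
    rw [scanXS, if_neg h]
    have h' : cs.length < 4 := by omega
    rw [cnt4_short _ _ (by decide) h', cnt4_short _ _ (by decide) h']
    simp
  | case1 cs total h ih =>
    obtain ⟨a, b, c, d, r, rfl⟩ : ∃ a b c d r, cs = a :: b :: c :: d :: r := by
      match cs, h with
      | a :: b :: c :: d :: r, _ => exact ⟨a, b, c, d, r, rfl⟩
    rw [scanXS, if_pos h]
    simp only [dite_eq_ite] at ih
    rw [ih]
    simp only [show "XMAS".toList = ['X', 'M', 'A', 'S'] from by decide,
      show "SAMX".toList = ['S', 'A', 'M', 'X'] from by decide] at *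
    by_cases hX : PySem.Chars.startswith (a :: b :: c :: d :: r) ['X', 'M', 'A', 'S'] = true
    · have hX' : 'X' = a ∧ 'M' = b ∧ 'A' = c ∧ 'S' = d := by
        rw [PySem.Chars.startswith_iff] at hX
        simpa [List.cons_prefix_cons] using hX
      obtain ⟨rfl, rfl, rfl, rfl⟩ := hX'
      rw [if_pos (by simp [hX])] at ih ⊢
      simp [cnt4, List.isPrefixOf]
      ring
    · by_cases hS : PySem.Chars.startswith (a :: b :: c :: d :: r) ['S', 'A', 'M', 'X'] = true
      · have hS' : 'S' = a ∧ 'A' = b ∧ 'M' = c ∧ 'X' = d := by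
          rw [PySem.Chars.startswith_iff] at hS
          simpa [List.cons_prefix_cons] using hS
        obtain ⟨rfl, rfl, rfl, rfl⟩ := hS'
        rw [if_pos (by simp [hS])] at ih ⊢
        simp [cnt4, List.isPrefixOf]
        ring
      · have hXp : (['X', 'M', 'A', 'S'] : List Char).isPrefixOf (a :: b :: c :: d :: r) = false := by
          rw [Bool.eq_false_iff]
          intro hc
          exact hX (((PySem.Chars.startswith_iff _ _).mpr ((@List.isPrefixOf_iff_prefix _ _ _ _).mp hc)))
        have hSp : (['S', 'A', 'M', 'X'] : List Char).isPrefixOf (a :: b :: c :: d :: r) = false := by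
          rw [Bool.eq_false_iff]
          intro hc
          exact hS (((PySem.Chars.startswith_iff _ _).mpr ((@List.isPrefixOf_iff_prefix _ _ _ _).mp hc)))
        have e1 : cnt4 ['X', 'M', 'A', 'S'] (a :: b :: c :: d :: r) = cnt4 ['X', 'M', 'A', 'S'] (b :: c :: d :: r) := by
          rw [cnt4, if_neg]
          simp [hXp]
        have e2 : cnt4 ['S', 'A', 'M', 'X'] (a :: b :: c :: d :: r) = cnt4 ['S', 'A', 'M', 'X'] (b :: c :: d :: r) := by
          rw [cnt4, if_neg]
          simp [hSp]
        rw [if_neg (by simp [hX, hS])] at ih ⊢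
        rw [e1, e2]
        simp

theorem foldl_eq_helper : ∀ (reports : List String) (acc : Int),
    reports.foldl
      (fun sum line =>
        let line := PySem.Str.strip line
        let m : Int := (PySem.Str.count line "XMAS" : Int)
        let m := m + (PySem.Str.count line "SAMX" : Int)
        sum + m) acc
    = reports.foldl (fun total line => scanXS (PySem.Str.strip line).toList total) acc := by
  intro reports
  induction reports with
  | nil => intro acc; rfl
  | cons x xs ih =>
    intro acc
    simp only [List.foldl_cons]
    rw [ih, scanXS_eq]
    congr 1
    rw [PySem.Str.count, PySem.Str.count,
      count_eq_cnt4 _ _ (by decide), count_eq_cnt4 _ _ (by decide),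
      show "XMAS".toList = ['X', 'M', 'A', 'S'] from by decide,
      show "SAMX".toList = ['S', 'A', 'M', 'X'] from by decide]
    ring

theorem XMAShorizontal_spec : Claim_equal_XMAShorizontal := by
  intro reports _
  unfold Spec_XMAShorizontal XMAShorizontal XMAShorizontal_alt
  exact foldl_eq_helper reports 0
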